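-- pv_equiv track=rewrite | github.com/sainihimanshu1999/Contest | Virtual Contest/LargestMagicSquare.py | largestMagicSqaure
-- ===== SOURCE A (Python) =====
-- def largestMagicSqaure(grid):
--
--     def magicSquare(i,j,l):
--         s = set()
--
--         for x in range(l):
--             sumi = 0
--             for y in range(l):
--                 sumi += grid[i+x][j+y]
--             s.add(sumi)
--             if len(s)>1:
--                 return False
--
--
--         for y in range(l):
--             sumi=0
--             for x in range(l):
--                 sumi += grid[i+x][j+y]
--
--             s.add(sumi)
--             if len(s)>1:
--                 return False
--
--         sumi = 0
--         for x in range(l):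
--             sumi += grid[i+x][j+x]
--
--         s.add(sumi)
--         if len(s)>1:
--             return False
--
--         sumi = 0
--         for x in range(l):
--             sumi += grid[i+x][j+l-1-x]
--         s.add(sumi)
--         if len(s)>1:
--             return False
--
--
--         return True
--
--
--
--     m = len(grid)
--     n = len(grid[0])
--
--     l = min(m,n)
--
--     for k in range(l,1,-1):
--         for i in range(m-k+1):
--             for j in range(n-k+1):
--                 if magicSquare(i,j,k):
--                     return k
--
--
--     return 1
-- ===== SOURCE B (Python) =====
-- def largestMagicSqaure(grid):
--     m = len(grid)
--     n = len(grid[0])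
--
--     # prefix sums: rp[i][j] = sum of grid[i][0..j-1]; cp[i][j] = sum of grid[0..i-1][j]
--     def prefix(row):
--         acc = [0]
--         for v in row:
--             acc.append(acc[-1] + v)
--         return acc
--
--     rp = [prefix(row) for row in grid]
--     cp = [[0] * n]
--     for row in grid:
--         cp.append([cp[-1][j] + row[j] for j in range(n)])
--
--     def ok(i, j, k):
--         t = rp[i][j + k] - rp[i][j]
--         for x in range(1, k):
--             if rp[i + x][j + k] - rp[i + x][j] != t:
--                 return False
--         for y in range(k):
--             if cp[i + k][j + y] - cp[i][j + y] != t: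
--                 return False
--         d1 = 0
--         d2 = 0
--         for x in range(k):
--             d1 += grid[i + x][j + x]
--             d2 += grid[i + x][j + k - 1 - x]
--         return d1 == t and d2 == t
--
--     for k in range(min(m, n), 1, -1):
--         for i in range(m - k + 1):
--             for j in range(n - k + 1):
--                 if ok(i, j, k):
--                     return k
--     return 1
-- ===== Notes on version B (the rewrite author's own statement) =====
-- stated objective: faster
-- what changed: B precomputes row and column prefix-sum tables once, so each k×k window is verified with O(k) prefix-sum differences plus the two diagonals instead of A's O(k^2) re-summation of every row and column.
-- outside the precondition, e.g. on largestMagicSqaure([[1, 1], [1, 1], [1]]): A returns 2, B raises IndexError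
import Mathlib
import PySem

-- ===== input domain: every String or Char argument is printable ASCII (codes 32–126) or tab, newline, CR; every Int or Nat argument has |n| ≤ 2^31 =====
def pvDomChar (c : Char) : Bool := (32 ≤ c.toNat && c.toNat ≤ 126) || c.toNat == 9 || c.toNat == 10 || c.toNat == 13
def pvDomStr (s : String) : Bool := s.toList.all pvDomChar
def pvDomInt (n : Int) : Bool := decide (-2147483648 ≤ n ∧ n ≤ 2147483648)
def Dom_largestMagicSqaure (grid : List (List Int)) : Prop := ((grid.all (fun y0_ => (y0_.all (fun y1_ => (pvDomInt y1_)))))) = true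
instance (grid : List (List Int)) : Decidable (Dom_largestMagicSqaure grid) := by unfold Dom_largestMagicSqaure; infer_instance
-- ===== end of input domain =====

-- B replaces A's per-window O(k^2) row/column re-summation by row/column prefix sums, so each
-- window check scans O(k) data; same scan order, same result. Return value only (no mutation).

-- ===== PORT A =====
-- grid[r][c] (total form; Pre_ keeps every access in range)
def pvAt (grid : List (List Int)) (r c : Int) : Int :=
  PySem.List.pyGetD ((PySem.List.pyGet? grid r).getD []) c 0

-- A's repeated loop shape 's.add(sumi); if len(s) > 1: return False', one iteration per index in xs
def pvChk (f : Int → Int) (xs : List Int) (s : PySem.Set Int) : Option (PySem.Set Int) :=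
  match xs with
  | [] => some s
  | x :: rest =>
    let s' := PySem.Set.add s (f x)
    if 1 < PySem.Set.len s' then none else pvChk f rest s'

-- def magicSquare(i,j,l)
def pvMagicSquare (grid : List (List Int)) (i j l : Int) : Bool :=
  match pvChk (fun x => (PySem.List.pyRange 0 l 1).foldl (fun acc y => acc + pvAt grid (i+x) (j+y)) 0)
        (PySem.List.pyRange 0 l 1) PySem.Set.empty with
  | none => false
  | some s =>
  match pvChk (fun y => (PySem.List.pyRange 0 l 1).foldl (fun acc x => acc + pvAt grid (i+x) (j+y)) 0)
        (PySem.List.pyRange 0 l 1) s with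
  | none => false
  | some s =>
    let d1 := (PySem.List.pyRange 0 l 1).foldl (fun acc x => acc + pvAt grid (i+x) (j+x)) 0
    let s1 := PySem.Set.add s d1
    if 1 < PySem.Set.len s1 then false
    else
      let d2 := (PySem.List.pyRange 0 l 1).foldl (fun acc x => acc + pvAt grid (i+x) (j+l-1-x)) 0
      let s2 := PySem.Set.add s1 d2
      if 1 < PySem.Set.len s2 then false else true

-- the triple 'for k … for i … for j … return k' loop
def pvAJ (grid : List (List Int)) (k i : Int) : List Int → Option Int
  | [] => none
  | j :: js => if pvMagicSquare grid i j k then some k else pvAJ grid k i js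

def pvAI (grid : List (List Int)) (n k : Int) : List Int → Option Int
  | [] => none
  | i :: is_ =>
    match pvAJ grid k i (PySem.List.pyRange 0 (n - k + 1) 1) with
    | some r => some r
    | none => pvAI grid n k is_

def pvAK (grid : List (List Int)) (m n : Int) : List Int → Option Int
  | [] => none
  | k :: ks =>
    match pvAI grid n k (PySem.List.pyRange 0 (m - k + 1) 1) with
    | some r => some r
    | none => pvAK grid m n ks

def largestMagicSqaure (grid : List (List Int)) : Int :=
  let m : Int := PySem.List.len grid
  let n : Int := PySem.List.len ((PySem.List.pyGet? grid 0).getD [])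
  let l : Int := min m n
  (pvAK grid m n (PySem.List.pyRange l 1 (-1))).getD 1

-- ===== PORT B =====
-- def prefix(row): acc = [0]; for v in row: acc.append(acc[-1] + v); return acc
def pvPrefix (row : List Int) : List Int :=
  row.foldl (fun acc v => acc ++ [PySem.List.pyGetD acc (-1) 0 + v]) [(0 : Int)]

-- def ok(i, j, k) — window check through the two prefix-sum tables
def pvOk (grid rp cp : List (List Int)) (i j k : Int) : Bool :=
  let t := PySem.List.pyGetD (PySem.List.pyGetD rp i []) (j+k) 0
           - PySem.List.pyGetD (PySem.List.pyGetD rp i []) j 0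
  (((PySem.List.pyRange 1 k 1).all fun x =>
      PySem.List.pyGetD (PySem.List.pyGetD rp (i+x) []) (j+k) 0
        - PySem.List.pyGetD (PySem.List.pyGetD rp (i+x) []) j 0 == t) &&
   ((PySem.List.pyRange 0 k 1).all fun y =>
      PySem.List.pyGetD (PySem.List.pyGetD cp (i+k) []) (j+y) 0
        - PySem.List.pyGetD (PySem.List.pyGetD cp i []) (j+y) 0 == t)) &&
  (let d := (PySem.List.pyRange 0 k 1).foldl
      (fun p x => (p.1 + pvAt grid (i+x) (j+x), p.2 + pvAt grid (i+x) (j+k-1-x))) ((0:Int), (0:Int))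
   d.1 == t && d.2 == t)

def pvBJ (grid rp cp : List (List Int)) (k i : Int) : List Int → Option Int
  | [] => none
  | j :: js => if pvOk grid rp cp i j k then some k else pvBJ grid rp cp k i js

def pvBI (grid rp cp : List (List Int)) (n k : Int) : List Int → Option Int
  | [] => none
  | i :: is_ =>
    match pvBJ grid rp cp k i (PySem.List.pyRange 0 (n - k + 1) 1) with
    | some r => some r
    | none => pvBI grid rp cp n k is_

def pvBK (grid rp cp : List (List Int)) (m n : Int) : List Int → Option Int
  | [] => none
  | k :: ks =>
    match pvBI grid rp cp n k (PySem.List.pyRange 0 (m - k + 1) 1) with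
    | some r => some r
    | none => pvBK grid rp cp m n ks

def largestMagicSqaure_alt (grid : List (List Int)) : Int :=
  let m : Int := PySem.List.len grid
  let n : Int := PySem.List.len ((PySem.List.pyGet? grid 0).getD [])
  let rp := grid.map pvPrefix
  let cp := grid.foldl
    (fun cp row => cp ++ [(PySem.List.pyRange 0 n 1).map
      (fun j => PySem.List.pyGetD (PySem.List.pyGetD cp (-1) []) j 0 + PySem.List.pyGetD row j 0)])
    [PySem.List.pyRepeat [(0 : Int)] n]
  (pvBK grid rp cp m n (PySem.List.pyRange (min m n) 1 (-1))).getD 1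

-- ===== PRECONDITION & SPEC =====
-- Pre_ excludes the empty grid (A raises IndexError on grid[0]) and ragged grids having a row
-- shorter than the first row, on which A raises IndexError except when its scan happens to find a
-- magic square first; B's prefix-sum tables always touch every row, so B raises there.
def Pre_largestMagicSqaure (grid : List (List Int)) : Prop :=
  grid ≠ [] ∧ ∀ row ∈ grid, grid.headI.length ≤ row.length
instance (grid : List (List Int)) : Decidable (Pre_largestMagicSqaure grid) := by
  unfold Pre_largestMagicSqaure; infer_instance

def pvWitness_largestMagicSqaure : List (List Int) := [[7, 1], [2, 3]]

def Spec_largestMagicSqaure (grid : List (List Int)) (out : Int) : Prop := out = largestMagicSqaure_alt grid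
instance (grid : List (List Int)) (out : Int) : Decidable (Spec_largestMagicSqaure grid out) := by unfold Spec_largestMagicSqaure; infer_instance

-- ===== CLAIM (what is proved, stated in full; the proofs are below) =====
def Claim_equal_largestMagicSqaure : Prop := ∀ (grid : List (List Int)), Dom_largestMagicSqaure grid → Pre_largestMagicSqaure grid → Spec_largestMagicSqaure grid (largestMagicSqaure grid)

-- ===== LEMMAS AND PROOFS =====

-- proof-side names for the window sums and for the values the two prefix loops compute
def pvRowAt (grid : List (List Int)) (t : Nat) : List Int := grid.getD t []
def pvCell (grid : List (List Int)) (r c : Nat) : Int := (pvRowAt grid r).getD c 0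
def pvRsum (grid : List (List Int)) (r a k : Nat) : Int :=
  ((List.range k).map (fun y => pvCell grid r (a+y))).sum
def pvCsum (grid : List (List Int)) (a c k : Nat) : Int :=
  ((List.range k).map (fun x => pvCell grid (a+x) c)).sum
def pvPrefL (s : Int) : List Int → List Int
  | [] => [s]
  | v :: r => s :: pvPrefL (s+v) r
def pvColL (n : Int) (cur : List Int) : List (List Int) → List (List Int)
  | [] => [cur]
  | row :: rest =>
      cur :: pvColL n ((PySem.List.pyRange 0 n 1).map
        (fun j => PySem.List.pyGetD cur j 0 + PySem.List.pyGetD row j 0)) rest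

lemma pvPrefix_foldl (row : List Int) : ∀ (a : List Int) (s : Int),
    row.foldl (fun acc v => acc ++ [PySem.List.pyGetD acc (-1) 0 + v]) (a ++ [s])
      = a ++ pvPrefL s row := by
  induction row with
  | nil => intro a s; simp [pvPrefL]
  | cons v r ih =>
    intro a s
    simp only [List.foldl_cons, PySem.List.pyGetD_neg_one_append_singleton, pvPrefL]
    have := ih (a ++ [s]) (s + v)
    simpa using this

lemma pvChk_single (f : Int → Int) (t : Int) : ∀ (xs : List Int),
    pvChk f xs [t] = if xs.all (fun x => f x == t) then some [t] else none := by
  intro xs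
  induction xs with
  | nil => simp [pvChk]
  | cons x rest ih =>
    by_cases h : f x = t
    · simp [pvChk, PySem.Set.add, PySem.Set.contains, PySem.Set.len, h, ih]
    · simp [pvChk, PySem.Set.add, PySem.Set.contains, PySem.Set.len, h]

lemma pvChk_start (f : Int → Int) (x : Int) (xs : List Int) :
    pvChk f (x :: xs) PySem.Set.empty = pvChk f xs [f x] := by
  simp [pvChk, PySem.Set.empty, PySem.Set.add, PySem.Set.contains, PySem.Set.len]

lemma pvAll_congr {p q : Int → Bool} {xs : List Int} (h : ∀ x ∈ xs, p x = q x) :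
    xs.all p = xs.all q := by
  induction xs with
  | nil => rfl
  | cons x rest ih =>
    simp only [List.all_cons, h x (List.mem_cons_self), ih (fun y hy => h y (List.mem_cons_of_mem _ hy))]

lemma pvRangeShift (f : Nat → Int) (a : Nat) : ∀ (l : Nat),
    ((List.range l).map (fun y => f (a+y))).sum
      = ((List.range (a+l)).map f).sum - ((List.range a).map f).sum := by
  intro l
  induction l with
  | zero => simp
  | succ l ih => rw [List.range_succ, ← Nat.add_assoc, List.range_succ]; simp [ih]; ring

lemma pvPrefL_getD (row : List Int) : ∀ (j : Nat) (s : Int), j ≤ row.length →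
    (pvPrefL s row).getD j 0 = s + ((List.range j).map (fun t => row.getD t 0)).sum := by
  induction row with
  | nil =>
    intro j s hj
    have hz : j = 0 := by simpa using hj
    subst hz; simp [pvPrefL]
  | cons v r ih =>
    intro j s hj
    cases j with
    | zero => simp [pvPrefL]
    | succ j =>
      simp only [pvPrefL, List.getD_cons_succ]
      rw [ih j (s+v) (by simpa using hj), List.range_succ_eq_map]
      simp only [List.map_map, List.map_cons, List.sum_cons]
      have h2 : ((List.range j).map ((fun t => (v :: r).getD t 0) ∘ Nat.succ)) = (List.range j).map (fun t => r.getD t 0) := by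
        apply List.map_congr_left; intro t _; simp
      rw [h2]
      have h3 : (v :: r).getD 0 0 = v := rfl
      rw [h3]; ring

lemma pvPrefix_eq (row : List Int) : pvPrefix row = pvPrefL 0 row := by
  have := pvPrefix_foldl row [] 0
  simpa [pvPrefix] using this


lemma pvCp_foldl (n : Int) (rows : List (List Int)) : ∀ (a : List (List Int)) (cur : List Int),
    rows.foldl (fun cp row => cp ++ [(PySem.List.pyRange 0 n 1).map
        (fun j => PySem.List.pyGetD (PySem.List.pyGetD cp (-1) []) j 0 + PySem.List.pyGetD row j 0)])
      (a ++ [cur]) = a ++ pvColL n cur rows := by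
  induction rows with
  | nil => intro a cur; simp [pvColL]
  | cons row rest ih =>
    intro a cur
    simp only [List.foldl_cons, PySem.List.pyGetD_neg_one_append_singleton, pvColL]
    have := ih (a ++ [cur]) ((PySem.List.pyRange 0 n 1).map
        (fun j => PySem.List.pyGetD cur j 0 + PySem.List.pyGetD row j 0))
    simpa using this


lemma pvColL_getD (n : Int) (rows : List (List Int)) : ∀ (r : Nat) (cur : List Int),
    r ≤ rows.length → ∀ (c : Nat), (c : Int) < n →
    (((pvColL n cur rows).getD r []).getD c 0 : Int)
      = cur.getD c 0 + ((List.range r).map (fun t => (rows.getD t []).getD c 0)).sum := by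
  induction rows with
  | nil =>
    intro r cur hr c hc
    have hz : r = 0 := by simpa using hr
    subst hz; simp [pvColL]
  | cons row rest ih =>
    intro r cur hr c hc
    cases r with
    | zero => simp [pvColL]
    | succ r =>
      simp only [pvColL, List.getD_cons_succ]
      rw [ih r _ (by simpa using hr) c hc]
      have hcur : ((PySem.List.pyRange 0 n 1).map
          (fun j => PySem.List.pyGetD cur j 0 + PySem.List.pyGetD row j 0)).getD c 0
          = cur.getD c 0 + row.getD c 0 := by
        have := PySem.List.pyGetD_map_pyRange_of_nonneg
          (fun j => PySem.List.pyGetD cur j 0 + PySem.List.pyGetD row j 0) n (c : Int) 0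
          (by positivity) hc
        simpa using this
      rw [hcur, List.range_succ_eq_map]
      simp only [List.map_map, List.map_cons, List.sum_cons]
      have h2 : ((List.range r).map ((fun t => ((row :: rest).getD t []).getD c 0) ∘ Nat.succ))
          = (List.range r).map (fun t => (rest.getD t []).getD c 0) := by
        apply List.map_congr_left; intro t _; simp
      rw [h2]
      have h3 : ((row :: rest).getD 0 []).getD c 0 = row.getD c 0 := rfl
      rw [h3]; ring


lemma pvFoldRow (grid : List (List Int)) (r c k : Nat) :
    (PySem.List.pyRange 0 (k : Int) 1).foldl (fun acc y => acc + pvAt grid (r : Int) ((c : Int) + y)) 0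
      = pvRsum grid r c k := by
  rw [PySem.List.foldl_add, PySem.List.pyRange_zero, List.map_map]
  simp only [pvRsum, zero_add, Int.toNat_natCast]
  apply congrArg List.sum
  apply List.map_congr_left
  intro y _
  simp only [Function.comp, pvAt, pvCell, pvRowAt]
  rw [show ((c:Int)+(y:Int)) = ((c+y : Nat) : Int) by push_cast; ring,
     PySem.List.pyGetD_natCast, List.getD_eq_getElem?_getD]
  simp [List.getD_eq_getElem?_getD]


lemma pvFoldCol (grid : List (List Int)) (r c k : Nat) :
    (PySem.List.pyRange 0 (k : Int) 1).foldl (fun acc x => acc + pvAt grid ((r : Int) + x) (c : Int)) 0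
      = pvCsum grid r c k := by
  rw [PySem.List.foldl_add, PySem.List.pyRange_zero, List.map_map]
  simp only [pvCsum, zero_add, Int.toNat_natCast]
  apply congrArg List.sum
  apply List.map_congr_left
  intro x _
  simp only [Function.comp, pvAt, pvCell, pvRowAt]
  rw [show ((r:Int)+(x:Int)) = ((r+x : Nat) : Int) by push_cast; ring,
     PySem.List.pyGet?_natCast, List.getD_eq_getElem?_getD]
  simp [List.getD_eq_getElem?_getD]

lemma pvRpDiff (grid : List (List Int)) (i j k : Nat) (hi : i < grid.length)
    (hjk : j + k ≤ (pvRowAt grid i).length) :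
    PySem.List.pyGetD (PySem.List.pyGetD (grid.map pvPrefix) (i : Int) []) ((j : Int) + (k : Int)) 0
      - PySem.List.pyGetD (PySem.List.pyGetD (grid.map pvPrefix) (i : Int) []) (j : Int) 0
      = pvRsum grid i j k := by
  have hrow : PySem.List.pyGetD (grid.map pvPrefix) (i : Int) [] = pvPrefL 0 (pvRowAt grid i) := by
    rw [PySem.List.pyGetD_natCast]
    simp [List.getD_eq_getElem?_getD, List.getElem?_map, pvRowAt, List.getElem?_eq_getElem hi,
      pvPrefix_eq]
  rw [hrow, show ((j : Int) + (k : Int)) = ((j + k : Nat) : Int) by push_cast; ring,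
    PySem.List.pyGetD_natCast, PySem.List.pyGetD_natCast,
    pvPrefL_getD _ _ _ hjk, pvPrefL_getD _ _ _ (by omega)]
  rw [zero_add, zero_add, ← pvRangeShift (fun t => (pvRowAt grid i).getD t 0) j k]
  simp [pvRsum, pvCell]


lemma pvCpDiff (grid : List (List Int)) (n : Int) (i j k : Nat) (hik : i + k ≤ grid.length)
    (hj : (j : Int) < n) :
    PySem.List.pyGetD (PySem.List.pyGetD (pvColL n (PySem.List.pyRepeat [(0:Int)] n) grid) ((i : Int) + (k : Int)) []) (j : Int) 0
      - PySem.List.pyGetD (PySem.List.pyGetD (pvColL n (PySem.List.pyRepeat [(0:Int)] n) grid) (i : Int) []) (j : Int) 0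
      = pvCsum grid i j k := by
  have hbase : (PySem.List.pyRepeat [(0:Int)] n).getD j 0 = 0 := by
    rw [PySem.List.pyRepeat_singleton]
    simp [List.getD_eq_getElem?_getD, List.getElem?_replicate]
    split <;> rfl
  have e1 : PySem.List.pyGetD (pvColL n (PySem.List.pyRepeat [(0:Int)] n) grid) ((i : Int) + (k : Int)) []
      = (pvColL n (PySem.List.pyRepeat [(0:Int)] n) grid).getD (i+k) [] := by
    rw [show ((i : Int) + (k : Int)) = ((i + k : Nat) : Int) by push_cast; ring,
      PySem.List.pyGetD_natCast]
  have e2 : PySem.List.pyGetD (pvColL n (PySem.List.pyRepeat [(0:Int)] n) grid) (i : Int) []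
      = (pvColL n (PySem.List.pyRepeat [(0:Int)] n) grid).getD i [] := by
    rw [PySem.List.pyGetD_natCast]
  rw [e1, e2, PySem.List.pyGetD_natCast, PySem.List.pyGetD_natCast,
    pvColL_getD n grid (i+k) _ hik j hj, pvColL_getD n grid i _ (by omega) j hj, hbase,
    ]
  have := pvRangeShift (fun t => (grid.getD t []).getD j 0) i k
  rw [zero_add, zero_add, ← this]
  simp [pvCsum, pvCell, pvRowAt]

lemma pvChk_range0 (f : Int → Int) (k : Int) (hk : 0 < k) :
    pvChk f (PySem.List.pyRange 0 k 1) PySem.Set.empty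
      = if (PySem.List.pyRange 1 k 1).all (fun x => f x == f 0) then some [f 0] else none := by
  rw [show (PySem.List.pyRange 0 k 1) = 0 :: PySem.List.pyRange 1 k 1 by
        simpa using PySem.List.pyRange_one_cons hk,
      pvChk_start, pvChk_single]

lemma pvMagic_eq_ok (grid : List (List Int)) (n : Int) (hn : n = (grid.headI.length : Int))
    (hrows : ∀ row ∈ grid, grid.headI.length ≤ row.length)
    (i j k : Nat) (hk : 0 < k) (him : i + k ≤ grid.length) (hjn : (j : Int) + (k : Int) ≤ n) :
    pvMagicSquare grid (i : Int) (j : Int) (k : Int)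
      = pvOk grid (grid.map pvPrefix) (pvColL n (PySem.List.pyRepeat [(0:Int)] n) grid)
          (i : Int) (j : Int) (k : Int) := by
  have hk0 : (0:Int) < (k:Int) := by exact_mod_cast hk
  have hjk' : j + k ≤ grid.headI.length := by
    rw [hn] at hjn; exact_mod_cast hjn
  have hrowlen : ∀ r : Nat, r < grid.length → j + k ≤ (pvRowAt grid r).length := by
    intro r hr
    have hmem : grid.getD r [] ∈ grid := by
      rw [List.getD_eq_getElem?_getD, List.getElem?_eq_getElem hr]
      exact List.getElem_mem hr
    exact le_trans hjk' (hrows _ hmem)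
  -- the four window sums, A-side
  have hfrow : ∀ x : Nat,
      (PySem.List.pyRange 0 (k:Int) 1).foldl
        (fun acc y => acc + pvAt grid ((i:Int)+(x:Int)) ((j:Int)+y)) 0 = pvRsum grid (i+x) j k := by
    intro x
    rw [show ((i:Int)+(x:Int)) = ((i+x : Nat):Int) by push_cast; ring]
    exact pvFoldRow grid (i+x) j k
  have hfrow0 :
      (PySem.List.pyRange 0 (k:Int) 1).foldl
        (fun acc y => acc + pvAt grid ((i:Int)+(0:Int)) ((j:Int)+y)) 0 = pvRsum grid i j k := by
    rw [show ((i:Int)+(0:Int)) = ((i : Nat):Int) by ring]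
    exact pvFoldRow grid i j k
  have hfcol : ∀ y : Nat,
      (PySem.List.pyRange 0 (k:Int) 1).foldl
        (fun acc x => acc + pvAt grid ((i:Int)+x) ((j:Int)+(y:Int))) 0 = pvCsum grid i (j+y) k := by
    intro y
    rw [show ((j:Int)+(y:Int)) = ((j+y : Nat):Int) by push_cast; ring]
    exact pvFoldCol grid i (j+y) k
  -- the rp / cp differences, B-side
  have hT : PySem.List.pyGetD (PySem.List.pyGetD (grid.map pvPrefix) (i:Int) []) ((j:Int)+(k:Int)) 0
      - PySem.List.pyGetD (PySem.List.pyGetD (grid.map pvPrefix) (i:Int) []) (j:Int) 0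
      = pvRsum grid i j k :=
    pvRpDiff grid i j k (by omega) (hrowlen i (by omega))
  -- reduce B's side
  rw [pvOk]
  rw [hT]
  have hRowsB : ((PySem.List.pyRange 1 (k:Int) 1).all fun x =>
      PySem.List.pyGetD (PySem.List.pyGetD (grid.map pvPrefix) ((i:Int)+x) []) ((j:Int)+(k:Int)) 0
        - PySem.List.pyGetD (PySem.List.pyGetD (grid.map pvPrefix) ((i:Int)+x) []) (j:Int) 0
        == pvRsum grid i j k)
      = ((PySem.List.pyRange 1 (k:Int) 1).all fun x =>
          pvRsum grid (i+x.toNat) j k == pvRsum grid i j k) := by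
    apply pvAll_congr
    intro x hx
    have hb := PySem.List.mem_pyRange_one.mp hx
    rw [show ((i:Int)+x) = ((i+x.toNat : Nat):Int) by push_cast; omega]
    rw [pvRpDiff grid (i+x.toNat) j k (by omega) (hrowlen _ (by omega))]
  have hColsB : ((PySem.List.pyRange 0 (k:Int) 1).all fun y =>
      PySem.List.pyGetD (PySem.List.pyGetD (pvColL n (PySem.List.pyRepeat [(0:Int)] n) grid) ((i:Int)+(k:Int)) []) ((j:Int)+y) 0
        - PySem.List.pyGetD (PySem.List.pyGetD (pvColL n (PySem.List.pyRepeat [(0:Int)] n) grid) (i:Int) []) ((j:Int)+y) 0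
        == pvRsum grid i j k)
      = ((PySem.List.pyRange 0 (k:Int) 1).all fun y =>
          pvCsum grid i (j+y.toNat) k == pvRsum grid i j k) := by
    apply pvAll_congr
    intro y hy
    have hb := PySem.List.mem_pyRange_one.mp hy
    rw [show ((j:Int)+y) = ((j+y.toNat : Nat):Int) by push_cast; omega]
    rw [pvCpDiff grid n i (j+y.toNat) k him (by push_cast; omega)]
  rw [hRowsB, hColsB, PySem.List.foldl_prod_mk
    (f := fun acc x => acc + pvAt grid ((i:Int)+x) ((j:Int)+x))
    (g := fun acc x => acc + pvAt grid ((i:Int)+x) ((j:Int)+(k:Int)-1-x))]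
  -- reduce A's side
  rw [pvMagicSquare, pvChk_range0 _ _ hk0]
  have hRowsA : ((PySem.List.pyRange 1 (k:Int) 1).all fun x =>
      ((PySem.List.pyRange 0 (k:Int) 1).foldl (fun acc y => acc + pvAt grid ((i:Int)+x) ((j:Int)+y)) 0
        == (PySem.List.pyRange 0 (k:Int) 1).foldl (fun acc y => acc + pvAt grid ((i:Int)+(0:Int)) ((j:Int)+y)) 0))
      = ((PySem.List.pyRange 1 (k:Int) 1).all fun x =>
          pvRsum grid (i+x.toNat) j k == pvRsum grid i j k) := by
    apply pvAll_congr
    intro x hx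
    have hb := PySem.List.mem_pyRange_one.mp hx
    rw [hfrow0, show ((i:Int)+x) = ((i:Int)+((x.toNat : Nat):Int)) by omega, hfrow x.toNat]
  rw [hRowsA, hfrow0]
  cases hrows1 : ((PySem.List.pyRange 1 (k:Int) 1).all fun x =>
      pvRsum grid (i+x.toNat) j k == pvRsum grid i j k) with
  | false => simp
  | true =>
    simp only [if_true, Bool.true_and]
    rw [pvChk_single]
    have hColsA : ((PySem.List.pyRange 0 (k:Int) 1).all fun y =>
        ((PySem.List.pyRange 0 (k:Int) 1).foldl (fun acc x => acc + pvAt grid ((i:Int)+x) ((j:Int)+y)) 0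
          == pvRsum grid i j k))
        = ((PySem.List.pyRange 0 (k:Int) 1).all fun y =>
            pvCsum grid i (j+y.toNat) k == pvRsum grid i j k) := by
      apply pvAll_congr
      intro y hy
      have hb := PySem.List.mem_pyRange_one.mp hy
      rw [show ((j:Int)+y) = ((j:Int)+((y.toNat : Nat):Int)) by omega, hfcol y.toNat]
    rw [hColsA]
    cases hcols : ((PySem.List.pyRange 0 (k:Int) 1).all fun y =>
        pvCsum grid i (j+y.toNat) k == pvRsum grid i j k) with
    | false => simp
    | true =>
      simp only [if_true, Bool.true_and]
      by_cases hd1 : (PySem.List.pyRange 0 (k:Int) 1).foldl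
          (fun acc x => acc + pvAt grid ((i:Int)+x) ((j:Int)+x)) 0 = pvRsum grid i j k
      · by_cases hd2 : (PySem.List.pyRange 0 (k:Int) 1).foldl
            (fun acc x => acc + pvAt grid ((i:Int)+x) ((j:Int)+(k:Int)-1-x)) 0 = pvRsum grid i j k
        · simp [PySem.Set.add, PySem.Set.contains, PySem.Set.len, hd1, hd2]
        · simp [PySem.Set.add, PySem.Set.contains, PySem.Set.len, hd1, hd2]
      · simp [PySem.Set.add, PySem.Set.contains, PySem.Set.len, hd1]

lemma pvJ_congr (grid rp cp : List (List Int)) (k i : Int) (js : List Int)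
    (h : ∀ j ∈ js, pvMagicSquare grid i j k = pvOk grid rp cp i j k) :
    pvAJ grid k i js = pvBJ grid rp cp k i js := by
  induction js with
  | nil => rfl
  | cons j js ih =>
    rw [pvAJ, pvBJ, h j (List.mem_cons_self), ih (fun j hj => h j (List.mem_cons_of_mem _ hj))]


lemma pvI_congr (grid rp cp : List (List Int)) (n k : Int) (is_ : List Int)
    (h : ∀ i ∈ is_, ∀ j ∈ PySem.List.pyRange 0 (n - k + 1) 1,
      pvMagicSquare grid i j k = pvOk grid rp cp i j k) :
    pvAI grid n k is_ = pvBI grid rp cp n k is_ := by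
  induction is_ with
  | nil => rfl
  | cons i is_ ih =>
    rw [pvAI, pvBI, pvJ_congr grid rp cp k i _ (h i (List.mem_cons_self)),
      ih (fun i hi => h i (List.mem_cons_of_mem _ hi))]


lemma pvK_congr (grid rp cp : List (List Int)) (m n : Int) (ks : List Int)
    (h : ∀ k ∈ ks, ∀ i ∈ PySem.List.pyRange 0 (m - k + 1) 1, ∀ j ∈ PySem.List.pyRange 0 (n - k + 1) 1,
      pvMagicSquare grid i j k = pvOk grid rp cp i j k) :
    pvAK grid m n ks = pvBK grid rp cp m n ks := by
  induction ks with
  | nil => rfl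
  | cons k ks ih =>
    rw [pvAK, pvBK, pvI_congr grid rp cp n k _ (h k (List.mem_cons_self)),
      ih (fun k hk => h k (List.mem_cons_of_mem _ hk))]


lemma pvMain (grid : List (List Int)) (hpre : Pre_largestMagicSqaure grid) :
    largestMagicSqaure grid = largestMagicSqaure_alt grid := by
  obtain ⟨hne, hrows⟩ := hpre
  rw [largestMagicSqaure, largestMagicSqaure_alt]
  have hcp : grid.foldl
      (fun cp row => cp ++ [(PySem.List.pyRange 0 (PySem.List.len ((PySem.List.pyGet? grid 0).getD [])) 1).map
        (fun j => PySem.List.pyGetD (PySem.List.pyGetD cp (-1) []) j 0 + PySem.List.pyGetD row j 0)])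
      [PySem.List.pyRepeat [(0 : Int)] (PySem.List.len ((PySem.List.pyGet? grid 0).getD []))]
      = pvColL (PySem.List.len ((PySem.List.pyGet? grid 0).getD []))
          (PySem.List.pyRepeat [(0 : Int)] (PySem.List.len ((PySem.List.pyGet? grid 0).getD []))) grid := by
    have := pvCp_foldl (PySem.List.len ((PySem.List.pyGet? grid 0).getD [])) grid []
      (PySem.List.pyRepeat [(0 : Int)] (PySem.List.len ((PySem.List.pyGet? grid 0).getD [])))
    simpa using this
  simp only [hcp]
  have hn : PySem.List.len ((PySem.List.pyGet? grid 0).getD []) = (grid.headI.length : Int) := by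
    cases grid with
    | nil => exact absurd rfl hne
    | cons g0 gs => simp [PySem.List.len_eq]
  have hm : PySem.List.len grid = (grid.length : Int) := PySem.List.len_eq grid
  rw [pvK_congr grid (grid.map pvPrefix) _ _ _ _ ?_]
  intro k hk i hi j hj
  rw [PySem.List.mem_pyRange_neg_one] at hk
  rw [PySem.List.mem_pyRange_one] at hi hj
  rw [hm] at hk hi
  rw [hn] at hk hj
  obtain ⟨hk1, hk2⟩ := hk
  have hi0 : 0 ≤ i := hi.1
  have hj0 : 0 ≤ j := hj.1
  have hkk : i = ((i.toNat : Nat) : Int) := by omega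
  have hjj : j = ((j.toNat : Nat) : Int) := by omega
  have hkc : k = ((k.toNat : Nat) : Int) := by omega
  rw [hkk, hjj, hkc]
  rw [hn]
  apply pvMagic_eq_ok grid _ rfl hrows
  · omega
  · have := hi.2
    have hmin : k ≤ (grid.length : Int) := le_trans hk2 (min_le_left _ _)
    omega
  · have := hj.2
    have hmin : k ≤ ((grid.headI.length : Nat) : Int) := le_trans hk2 (min_le_right _ _)
    omega

-- ===== VERDICT (by name: the statement is the Claim_ definition above) =====
theorem largestMagicSqaure_spec : Claim_equal_largestMagicSqaure := by
  intro grid _ hpre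
  unfold Spec_largestMagicSqaure
  exact pvMain grid hpre
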